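-- pv_equiv track=rewrite | github.com/Poomon001/Competitive-Programming | club python/Merge Two 2D Arrays by Summing Values/main.py | mergeArrays_M1
-- ===== SOURCE A (Python) =====
-- from typing import List
--
-- def mergeArrays_M1(nums1: List[List[int]], nums2: List[List[int]]) -> List[List[int]]:
--     ans = []
--     i = j = 0
--     while i < len(nums1) and j < len(nums2):
--         idx1, num1 = nums1[i]
--         idx2, num2 = nums2[j]
--         if idx1 < idx2:
--             ans.append([idx1, num1])
--             i += 1
--         elif idx2 < idx1:
--             ans.append([idx2, num2])
--             j += 1
--         else:
--             ans.append([idx1, num2 + num1])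
--             i += 1
--             j += 1
--
--     while i < len(nums1):
--         idx1, num1 = nums1[i]
--         ans.append([idx1, num1])
--         i += 1
--
--     while j < len(nums2):
--         idx2, num2 = nums2[j]
--         ans.append([idx2, num2])
--         j += 1
--
--     return ans
-- ===== SOURCE B (Python) =====
-- from typing import List
--
-- def mergeArrays_M1(nums1: List[List[int]], nums2: List[List[int]]) -> List[List[int]]:
--     if not nums1:
--         return [[i, v] for i, v in nums2]
--     if not nums2:
--         return [[i, v] for i, v in nums1]
--     (i1, v1), (i2, v2) = nums1[0], nums2[0]
--     if i1 < i2: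
--         return [[i1, v1]] + mergeArrays_M1(nums1[1:], nums2)
--     if i2 < i1:
--         return [[i2, v2]] + mergeArrays_M1(nums1, nums2[1:])
--     return [[i1, v1 + v2]] + mergeArrays_M1(nums1[1:], nums2[1:])
-- ===== Notes on version B (the rewrite author's own statement) =====
-- stated objective: simpler
-- what changed: Replaces A's three index-driven while loops over a mutable accumulator by a direct structural recursion on the two lists: comprehension base cases for an exhausted side, head unpacking with early returns, and slice recursion; the same merge is computed without any index or mutable state.
import Mathlib
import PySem

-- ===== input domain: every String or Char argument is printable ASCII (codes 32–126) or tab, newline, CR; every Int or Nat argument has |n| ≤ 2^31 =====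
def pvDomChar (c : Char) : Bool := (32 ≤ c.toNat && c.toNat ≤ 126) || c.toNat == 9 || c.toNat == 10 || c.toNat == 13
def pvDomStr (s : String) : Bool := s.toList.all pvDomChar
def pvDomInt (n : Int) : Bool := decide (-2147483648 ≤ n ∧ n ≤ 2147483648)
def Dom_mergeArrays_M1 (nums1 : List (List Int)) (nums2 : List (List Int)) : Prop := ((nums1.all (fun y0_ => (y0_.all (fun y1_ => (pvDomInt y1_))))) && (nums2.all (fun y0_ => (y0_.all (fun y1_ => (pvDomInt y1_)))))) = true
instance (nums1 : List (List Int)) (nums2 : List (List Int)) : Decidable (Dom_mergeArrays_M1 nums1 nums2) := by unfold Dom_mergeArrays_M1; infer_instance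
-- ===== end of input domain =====

-- B replaces A's three index-driven while loops over a mutable accumulator by a direct
-- structural recursion on the two lists (comprehension base cases, head unpacking with
-- early returns, slice recursion); same return value on every admitted input.
-- The Python unpack `idx, num = row` raises ValueError on rows of length ≠ 2; those
-- inputs are excluded by Pre_; the ports read rows with getD (exact on length-2 rows).

-- ===== PORT A =====
-- second while loop of A (and, with the other list, the third): copy suffix from index k
def pvTailA (nums : List (List Int)) (k : Nat) (ans : List (List Int)) : List (List Int) :=
  if h : k < nums.length then
    pvTailA nums (k + 1) (ans ++ [[(nums.getD k []).getD 0 0, (nums.getD k []).getD 1 0]])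
  else ans
termination_by nums.length - k
decreasing_by omega

-- first while loop of A: three-way comparison of the rows at the two cursors
def pvLoopA (nums1 nums2 : List (List Int)) (i j : Nat) (ans : List (List Int)) : List (List Int) :=
  if h : i < nums1.length ∧ j < nums2.length then
    if (nums1.getD i []).getD 0 0 < (nums2.getD j []).getD 0 0 then
      pvLoopA nums1 nums2 (i + 1) j (ans ++ [[(nums1.getD i []).getD 0 0, (nums1.getD i []).getD 1 0]])
    else if (nums2.getD j []).getD 0 0 < (nums1.getD i []).getD 0 0 then
      pvLoopA nums1 nums2 i (j + 1) (ans ++ [[(nums2.getD j []).getD 0 0, (nums2.getD j []).getD 1 0]])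
    else
      pvLoopA nums1 nums2 (i + 1) (j + 1)
        (ans ++ [[(nums1.getD i []).getD 0 0, (nums2.getD j []).getD 1 0 + (nums1.getD i []).getD 1 0]])
  else pvTailA nums2 j (pvTailA nums1 i ans)
termination_by (nums1.length - i) + (nums2.length - j)
decreasing_by all_goals omega

def mergeArrays_M1 (nums1 : List (List Int)) (nums2 : List (List Int)) : List (List Int) :=
  pvLoopA nums1 nums2 0 0 []

-- ===== PORT B =====
-- Source B's structural recursion: comprehension base cases, then the three early returns
def pvRecB : List (List Int) → List (List Int) → List (List Int)
  | [], n2 => n2.map (fun r => [r.getD 0 0, r.getD 1 0])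
  | r1 :: t1, [] => (r1 :: t1).map (fun r => [r.getD 0 0, r.getD 1 0])
  | r1 :: t1, r2 :: t2 =>
      if r1.getD 0 0 < r2.getD 0 0 then
        [[r1.getD 0 0, r1.getD 1 0]] ++ pvRecB t1 (r2 :: t2)
      else if r2.getD 0 0 < r1.getD 0 0 then
        [[r2.getD 0 0, r2.getD 1 0]] ++ pvRecB (r1 :: t1) t2
      else
        [[r1.getD 0 0, r1.getD 1 0 + r2.getD 1 0]] ++ pvRecB t1 t2
termination_by n1 n2 => n1.length + n2.length

def mergeArrays_M1_alt (nums1 : List (List Int)) (nums2 : List (List Int)) : List (List Int) :=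
  pvRecB nums1 nums2

-- ===== PRECONDITION & SPEC =====
-- Pre_ excludes exactly the inputs where Python A raises ValueError: a row that is not a
-- [index, value] pair (length ≠ 2) fails the tuple unpack in A's loops.
def Pre_mergeArrays_M1 (nums1 : List (List Int)) (nums2 : List (List Int)) : Prop :=
  (∀ r ∈ nums1, r.length = 2) ∧ (∀ r ∈ nums2, r.length = 2)
instance (nums1 : List (List Int)) (nums2 : List (List Int)) : Decidable (Pre_mergeArrays_M1 nums1 nums2) := by unfold Pre_mergeArrays_M1; infer_instance

def pvWitness_mergeArrays_M1 : List (List Int) × List (List Int) :=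
  ([[1, 2], [3, 4]], [[2, 5], [3, 6]])

def Spec_mergeArrays_M1 (nums1 : List (List Int)) (nums2 : List (List Int)) (out : List (List Int)) : Prop := out = mergeArrays_M1_alt nums1 nums2
instance (nums1 : List (List Int)) (nums2 : List (List Int)) (out : List (List Int)) : Decidable (Spec_mergeArrays_M1 nums1 nums2 out) := by unfold Spec_mergeArrays_M1; infer_instance

-- ===== CLAIM =====
def Claim_equal_mergeArrays_M1 : Prop := ∀ (nums1 : List (List Int)) (nums2 : List (List Int)), Dom_mergeArrays_M1 nums1 nums2 → Pre_mergeArrays_M1 nums1 nums2 → Spec_mergeArrays_M1 nums1 nums2 (mergeArrays_M1 nums1 nums2)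

-- ===== LEMMAS AND PROOFS =====

-- A's copy loop appends the pairified suffix
theorem pvTailA_eq (nums : List (List Int)) (k : Nat) (ans : List (List Int)) :
    pvTailA nums k ans = ans ++ (nums.drop k).map (fun r => [r.getD 0 0, r.getD 1 0]) := by
  fun_induction pvTailA nums k ans with
  | case1 k ans h ih =>
    rw [ih, List.drop_eq_getElem_cons h, List.getD_eq_getElem _ _ h]
    simp
    rw [List.drop_eq_getElem_cons (show k < (List.map (fun r : List Int => [r[0]?.getD 0, r[1]?.getD 0]) nums).length by simpa using h)]
    simp
  | case2 k ans h =>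
    rw [List.drop_eq_nil_of_le (by omega)]
    simp

-- B on an exhausted second list is the comprehension over the first
theorem pvRecB_nil_right (n1 : List (List Int)) :
    pvRecB n1 [] = n1.map (fun r => [r.getD 0 0, r.getD 1 0]) := by
  cases n1 <;> rw [pvRecB]

-- A's merge loop from cursors (i, j) is B's recursion on the two suffixes
theorem pvLoopA_eq_recB (nums1 nums2 : List (List Int)) (i j : Nat) (ans : List (List Int)) :
    pvLoopA nums1 nums2 i j ans = ans ++ pvRecB (nums1.drop i) (nums2.drop j) := by
  fun_induction pvLoopA nums1 nums2 i j ans with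
  | case1 i j ans h hlt ih =>
    rw [ih, List.drop_eq_getElem_cons h.1, List.drop_eq_getElem_cons h.2,
      ← List.getD_eq_getElem nums1 [] h.1, ← List.getD_eq_getElem nums2 [] h.2,
      pvRecB, if_pos hlt]
    simp
  | case2 i j ans h hlt hgt ih =>
    rw [ih, List.drop_eq_getElem_cons h.1, List.drop_eq_getElem_cons h.2,
      ← List.getD_eq_getElem nums1 [] h.1, ← List.getD_eq_getElem nums2 [] h.2,
      pvRecB, if_neg hlt, if_pos hgt]
    simp
  | case3 i j ans h hlt hgt ih =>
    rw [ih, List.drop_eq_getElem_cons h.1, List.drop_eq_getElem_cons h.2,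
      ← List.getD_eq_getElem nums1 [] h.1, ← List.getD_eq_getElem nums2 [] h.2,
      pvRecB, if_neg hlt, if_neg hgt]
    rw [Int.add_comm ((nums2.getD j []).getD 1 0) ((nums1.getD i []).getD 1 0)]
    simp
  | case4 i j ans h =>
    rw [pvTailA_eq, pvTailA_eq]
    by_cases hj : j < nums2.length
    · have hi : nums1.length ≤ i := by omega
      rw [List.drop_eq_nil_of_le hi]
      simp [pvRecB]
    · rw [List.drop_eq_nil_of_le (by omega : nums2.length ≤ j), pvRecB_nil_right]
      simp

-- ===== VERDICT =====
theorem mergeArrays_M1_spec : Claim_equal_mergeArrays_M1 := by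
  intro nums1 nums2 _ _
  unfold Spec_mergeArrays_M1 mergeArrays_M1 mergeArrays_M1_alt
  simpa using pvLoopA_eq_recB nums1 nums2 0 0 []
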